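-- pv_equiv track=rewrite | github.com/startracex/sherry | sherry/node.py | split_pattern
-- ===== SOURCE A (Python) =====
-- def wild_of(s):
--     if not s:
--         return False, "", False
--     if s[0] == '*':
--         return True, s[1:], True
--     if s[0] == ':':
--         return True, s[1:], False
--     if s[0] == '{' and s[-1] == '}':
--         return True, s[1:-1], False
--     if s.startswith('...'):
--         return True, s[3:], True
--     return False, "", False
--
-- def split_pattern(pattern):
--     parts = []
--     for part in pattern.split("/"):
--         if part:
--             _, _, is_multi = wild_of(part)
--             if is_multi:
--                 break
--             parts.append(part)
--     return parts
-- ===== SOURCE B (Python) =====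
-- def split_pattern(pattern):
--     # Scan the raw string for the first multi-wildcard marker: a '*' or '...'
--     # standing at a segment start (index 0 or just after a '/'). Only the
--     # prefix before that position is ever split into parts.
--     cut = len(pattern)
--     for i in range(len(pattern)):
--         if (i == 0 or pattern[i - 1] == '/') and \
--            (pattern[i] == '*' or pattern[i:i + 3] == '...'):
--             cut = i
--             break
--     return [p for p in pattern[:cut].split('/') if p]
-- ===== Notes on version B (the rewrite author's own statement) =====
-- stated objective: alternative
-- what changed: Instead of splitting the whole string and looping over segments until a multi-wildcard one, B scans the raw string once for the index of the first '*' or '...' standing at a segment start (index 0 or right after '/'), then splits only the prefix before that index and keeps its nonempty parts.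
import Mathlib
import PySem

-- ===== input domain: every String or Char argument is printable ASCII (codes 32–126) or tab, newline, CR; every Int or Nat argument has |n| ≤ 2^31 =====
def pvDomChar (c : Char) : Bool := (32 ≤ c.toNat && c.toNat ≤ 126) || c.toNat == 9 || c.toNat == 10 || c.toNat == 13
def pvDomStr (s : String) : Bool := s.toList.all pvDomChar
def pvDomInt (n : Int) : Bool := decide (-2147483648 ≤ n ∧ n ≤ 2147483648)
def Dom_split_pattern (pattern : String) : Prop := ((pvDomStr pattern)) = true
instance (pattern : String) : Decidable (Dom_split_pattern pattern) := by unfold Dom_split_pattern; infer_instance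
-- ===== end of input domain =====

-- B replaces A's split-then-scan-segments loop by a raw-string index scan that finds the first
-- multi-wildcard marker position and splits only the prefix before it (alternative; same cost).
-- ===== PORT A =====
-- wild_of: literal transliteration of the helper (returns (is_wild, name, is_multi))
def wild_of (s : String) : Bool × String × Bool :=
  if s.toList = [] then (false, "", false)
  else if PySem.Str.pyGet? s 0 = some '*' then (true, PySem.Str.slice s (some 1) none, true)
  else if PySem.Str.pyGet? s 0 = some ':' then (true, PySem.Str.slice s (some 1) none, false)
  else if PySem.Str.pyGet? s 0 = some '{' ∧ PySem.Str.pyGet? s (-1) = some '}' then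
    (true, PySem.Str.slice s (some 1) (some (-1)), false)
  else if PySem.Str.startswith s "..." then (true, PySem.Str.slice s (some 3) none, true)
  else (false, "", false)

-- the for-loop with its parts accumulator and break
def split_pattern_loop (acc : List String) : List String → List String
  | [] => acc
  | part :: rest =>
      if part.toList ≠ [] then
        if (wild_of part).2.2 then acc   -- break: return parts so far
        else split_pattern_loop (acc ++ [part]) rest
      else split_pattern_loop acc rest

def split_pattern (pattern : String) : List String :=
  split_pattern_loop [] ((PySem.Str.split? pattern "/").getD [])

-- ===== PORT B =====
-- the 'for i in range(len(pattern)): … break' scan for the cut position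
-- (pattern.toList.length is len(pattern), the same number PySem.Str.len computes)
def split_pattern_cut (pattern : String) (i : Nat) : Nat :=
  if h : i < pattern.toList.length then
    if (i = 0 ∨ PySem.Str.pyGet? pattern ((i : Int) - 1) = some '/') ∧
       (PySem.Str.pyGet? pattern (i : Int) = some '*' ∨
        PySem.Str.slice pattern (some (i : Int)) (some ((i : Int) + 3)) = "...")
    then i
    else split_pattern_cut pattern (i + 1)
  else pattern.toList.length
termination_by pattern.toList.length - i
decreasing_by omega

-- B: find the cut in the raw string, then split the prefix and keep nonempty parts
def split_pattern_alt (pattern : String) : List String :=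
  let cut := split_pattern_cut pattern 0
  ((PySem.Str.split? (PySem.Str.slice pattern none (some (cut : Int))) "/").getD []).filter
    (fun p => !(p.toList = []))

-- ===== PRECONDITION & SPEC =====
def Spec_split_pattern (pattern : String) (out : List String) : Prop := out = split_pattern_alt pattern
instance (pattern : String) (out : List String) : Decidable (Spec_split_pattern pattern out) := by unfold Spec_split_pattern; infer_instance

-- ===== CLAIM (what is proved, stated in full; the proofs are below) =====
def Claim_equal_split_pattern : Prop := ∀ (pattern : String), Dom_split_pattern pattern → Spec_split_pattern pattern (split_pattern pattern)

-- ===== LEMMAS AND PROOFS =====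

-- multi-wildcard test on a raw char segment
def multiB (x : List Char) : Bool := decide (x.head? = some '*' ∨ x.take 3 = ['.', '.', '.'])

-- split by '/' as a plain structural recursion (proof-side mirror of PySem.Chars.splitOn · ['/'])
def consHd (c : Char) : List (List Char) → List (List Char)
  | [] => [[c]]
  | s :: ss => (c :: s) :: ss

def sp : List Char → List (List Char)
  | [] => [[]]
  | c :: r => if c = '/' then [] :: sp r else consHd c (sp r)

def preHd (pre : List Char) : List (List Char) → List (List Char)
  | [] => [pre]
  | s :: ss => (pre ++ s) :: ss

lemma sp_ne_nil (cs : List Char) : sp cs ≠ [] := by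
  cases cs with
  | nil => simp [sp]
  | cons c r =>
    simp only [sp]
    split
    · simp
    · cases h : sp r <;> simp [consHd]

lemma preHd_append (pre : List Char) (c : Char) (xs : List (List Char)) :
    preHd (pre ++ [c]) xs = preHd pre (consHd c xs) := by
  cases xs <;> simp [preHd, consHd]

lemma splitOn_go_spec (fuel : Nat) (l cur : List Char) (acc : List (List Char))
    (h : l.length < fuel) :
    PySem.Chars.splitOn.go ['/'] fuel l cur acc = acc.reverse ++ preHd cur.reverse (sp l) := by
  induction fuel generalizing l cur acc with
  | zero => omega
  | succ fuel ih =>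
    cases l with
    | nil => simp [PySem.Chars.splitOn.go, sp, preHd]
    | cons c rest =>
      by_cases hc : c = '/'
      · have hp : List.isPrefixOf ['/'] (c :: rest) = true := by simp [List.isPrefixOf, hc]
        rw [PySem.Chars.splitOn.go, if_pos hp]
        rw [ih _ _ _ (by simp at h ⊢; omega)]
        simp [sp, hc, preHd]
        cases hs : sp rest with
        | nil => exact absurd hs (sp_ne_nil rest)
        | cons s ss => simp [preHd]
      · have hp : List.isPrefixOf ['/'] (c :: rest) = false := by
          simp [List.isPrefixOf]; exact fun hh => absurd hh.symm hc
        rw [PySem.Chars.splitOn.go, if_neg (by simp [hp])]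
        rw [ih _ _ _ (by simp at h ⊢; omega)]
        simp only [sp, if_neg hc, List.reverse_cons]
        rw [preHd_append]

lemma splitOn_eq_sp (cs : List Char) : PySem.Chars.splitOn cs ['/'] = sp cs := by
  rw [PySem.Chars.splitOn, splitOn_go_spec _ _ _ _ (by omega)]
  cases hs : sp cs with
  | nil => exact absurd hs (sp_ne_nil cs)
  | cons s ss => simp [preHd, hs]

-- the relative cut scanner: atStart says whether the current position begins a segment
def cutRel : Bool → List Char → Nat
  | _, [] => 0
  | b, c :: r =>
      if b = true ∧ (c = '*' ∨ (c :: r).take 3 = ['.', '.', '.']) then 0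
      else 1 + cutRel (c == '/') r

lemma cutRel_cons_pos (b : Bool) (c : Char) (r : List Char)
    (h : b = true ∧ (c = '*' ∨ (c :: r).take 3 = ['.', '.', '.'])) :
    cutRel b (c :: r) = 0 := by
  simp only [cutRel]; rw [if_pos h]

lemma cutRel_cons_neg (b : Bool) (c : Char) (r : List Char)
    (h : ¬ (b = true ∧ (c = '*' ∨ (c :: r).take 3 = ['.', '.', '.']))) :
    cutRel b (c :: r) = 1 + cutRel (c == '/') r := by
  simp only [cutRel]; rw [if_neg h]

-- the port's index loop is the relative scanner
lemma cut_eq (pattern : String) : ∀ (k i : Nat), pattern.toList.length ≤ i + k →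
    i ≤ pattern.toList.length →
    split_pattern_cut pattern i =
      i + cutRel (decide (i = 0) || (pattern.toList[i-1]? == some '/'))
        (pattern.toList.drop i) := by
  intro k
  induction k with
  | zero =>
    intro i h1 h2
    have hi : i = pattern.toList.length := by omega
    rw [split_pattern_cut.eq_def, dif_neg (by omega)]
    rw [hi, List.drop_length]
    simp [cutRel]
  | succ k ih =>
    intro i h1 h2
    by_cases hlt : i < pattern.toList.length
    · rw [split_pattern_cut.eq_def, dif_pos hlt]
      have hdrop : pattern.toList.drop i = pattern.toList[i] :: pattern.toList.drop (i+1) :=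
        List.drop_eq_getElem_cons hlt
      have e1 : (PySem.Str.pyGet? pattern (i : Int) = some '*') ↔ (pattern.toList[i] = '*') := by
        rw [PySem.Str.pyGet?_natCast, List.getElem?_eq_getElem hlt]; simp
      have e2 : (PySem.Str.slice pattern (some (i : Int)) (some ((i : Int) + 3)) = "...") ↔
          ((pattern.toList.drop i).take 3 = ['.', '.', '.']) := by
        rw [String.ext_iff]
        have hsl : (PySem.Str.slice pattern (some (i : Int)) (some ((i : Int) + 3))).toList
            = (pattern.toList.drop i).take 3 := by
          rw [PySem.Str.toList_slice, PySem.Chars.slice_eq_listSlice]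
          have h3 : ((i : Int) + 3) = ((i + 3 : Nat) : Int) := by push_cast; ring
          rw [h3, PySem.List.slice_natCast]
          congr 1
          omega
        rw [hsl]
        exact Iff.rfl
      have e3 : (i = 0 ∨ PySem.Str.pyGet? pattern ((i : Int) - 1) = some '/') ↔
          ((decide (i = 0) || (pattern.toList[i-1]? == some '/')) = true) := by
        by_cases h0 : i = 0
        · simp [h0]
        · have hi1 : ((i : Int) - 1) = ((i - 1 : Nat) : Int) := by omega
          rw [hi1, PySem.Str.pyGet?_natCast]
          simp [h0]
      have hiff : ((i = 0 ∨ PySem.Str.pyGet? pattern ((i : Int) - 1) = some '/') ∧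
          (PySem.Str.pyGet? pattern (i : Int) = some '*' ∨
           PySem.Str.slice pattern (some (i : Int)) (some ((i : Int) + 3)) = "...")) ↔
          (((decide (i = 0) || (pattern.toList[i-1]? == some '/')) = true) ∧
           (pattern.toList[i] = '*' ∨
            (pattern.toList[i] :: pattern.toList.drop (i+1)).take 3 = ['.', '.', '.'])) := by
        exact and_congr e3 (or_congr e1 (e2.trans (by rw [hdrop])))
      rw [hdrop]
      by_cases hcond : ((i = 0 ∨ PySem.Str.pyGet? pattern ((i : Int) - 1) = some '/') ∧
          (PySem.Str.pyGet? pattern (i : Int) = some '*' ∨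
           PySem.Str.slice pattern (some (i : Int)) (some ((i : Int) + 3)) = "..."))
      · rw [if_pos hcond, cutRel_cons_pos _ _ _ (hiff.mp hcond)]
        omega
      · rw [if_neg hcond, cutRel_cons_neg _ _ _ (fun hx => hcond (hiff.mpr hx))]
        rw [ih (i+1) (by omega) (by omega)]
        have hflag : (decide (i + 1 = 0) || (pattern.toList[(i+1)-1]? == some '/'))
            = (pattern.toList[i] == '/') := by
          simp [List.getElem?_eq_getElem hlt]
        rw [hflag]
        omega
    · have hi : i = pattern.toList.length := by omega
      rw [split_pattern_cut.eq_def, dif_neg (by omega)]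
      rw [hi, List.drop_length]
      simp [cutRel]

-- segment-level facts
lemma sp_free (seg : List Char) (h : ∀ c ∈ seg, c ≠ '/') : sp seg = [seg] := by
  induction seg with
  | nil => simp [sp]
  | cons c s ih =>
    have hc : c ≠ '/' := h c (by simp)
    simp [sp, hc, ih (fun d hd => h d (by simp [hd])), consHd]

lemma sp_app (seg : List Char) (t : List Char) (h : ∀ c ∈ seg, c ≠ '/') :
    sp (seg ++ '/' :: t) = seg :: sp t := by
  induction seg with
  | nil => simp [sp]
  | cons c s ih =>
    have hc : c ≠ '/' := h c (by simp)
    simp [sp, hc, ih (fun d hd => h d (by simp [hd])), consHd]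

lemma cutRel_false_free (seg t : List Char) (h : ∀ c ∈ seg, c ≠ '/') :
    cutRel false (seg ++ t) = seg.length + cutRel false t := by
  induction seg with
  | nil => simp
  | cons c s ih =>
    have hc : c ≠ '/' := h c (by simp)
    have hb : (c == '/') = false := by simp [hc]
    simp only [List.cons_append, cutRel, hb]
    rw [if_neg (by simp)]
    rw [ih (fun d hd => h d (by simp [hd]))]
    simp only [List.length_cons]
    omega

lemma take3_app (seg t : List Char) (h : ∀ c ∈ seg, c ≠ '/') :
    ((seg ++ '/' :: t).take 3 = ['.', '.', '.']) ↔ (seg.take 3 = ['.', '.', '.']) := by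
  match seg with
  | [] => simp [show ('/' : Char) ≠ '.' from by decide]
  | [a] => cases t <;> simp [show ('/' : Char) ≠ '.' from by decide]
  | [a, b] => simp [show ('/' : Char) ≠ '.' from by decide]
  | a :: b :: d :: tl => simp

lemma seg_decomp (r : List Char) :
    ∃ s t, r = s ++ t ∧ (∀ d ∈ s, d ≠ '/') ∧ (t = [] ∨ ∃ ts, t = '/' :: ts) := by
  induction r with
  | nil => exact ⟨[], [], by simp, by simp, Or.inl rfl⟩
  | cons c rr ih =>
    by_cases hc : c = '/'
    · exact ⟨[], c :: rr, by simp, by simp, Or.inr ⟨rr, by rw [hc]⟩⟩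
    · obtain ⟨s, t, h1, h2, h3⟩ := ih
      exact ⟨c :: s, t, by simp [h1], by
        intro d hd
        rcases List.mem_cons.mp hd with h | h
        · exact h ▸ hc
        · exact h2 d h, h3⟩

-- MAIN: char-level equivalence of the two pipelines
lemma main_lemma : ∀ (n : Nat) (cs : List Char), cs.length ≤ n →
    (sp (cs.take (cutRel true cs))).filter (fun x => !(x = [])) =
      ((sp cs).filter (fun x => !(x = []))).takeWhile (fun x => !(multiB x)) := by
  intro n
  induction n with
  | zero =>
    intro cs hcs
    have : cs = [] := List.eq_nil_of_length_eq_zero (by omega)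
    subst this
    decide
  | succ n ih =>
    intro cs hcs
    cases cs with
    | nil => decide
    | cons c r =>
      by_cases hc : c = '/'
      · subst hc
        have htk : (('/' : Char) :: r).take 3 ≠ ['.', '.', '.'] := by
          cases r with
          | nil => simp
          | cons g ts => cases ts <;> simp [show ('/' : Char) ≠ '.' from by decide]
        have hcut : cutRel true ('/' :: r) = 1 + cutRel true r := by
          rw [cutRel_cons_neg _ _ _ (by
            rintro ⟨-, h2 | h2⟩
            · exact absurd h2 (by decide)
            · exact htk h2)]
          simp
        rw [hcut]
        have htake : (('/' : Char) :: r).take (1 + cutRel true r) = '/' :: r.take (cutRel true r) := by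
          rw [Nat.add_comm]
          simp [List.take_succ_cons]
        rw [htake]
        have hsp' : ∀ t : List Char, sp ('/' :: t) = [] :: sp t := fun t => by simp [sp]
        rw [hsp', hsp']
        rw [List.filter_cons_of_neg (by simp), List.filter_cons_of_neg (by simp)]
        exact ih r (by simpa using Nat.lt_succ_iff.mp (by simpa using hcs))
      · obtain ⟨s, t, hr, hs, ht⟩ := seg_decomp r
        have multiB_of : ∀ x : List Char,
            (c = '*' ∨ (c :: x).take 3 = ['.', '.', '.']) → multiB (c :: x) = true := by
          intro x h2
          simp only [multiB, List.head?_cons, Option.some.injEq, decide_eq_true_eq]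
          exact h2
        rcases ht with ht | ⟨rest, ht⟩
        · -- r is '/'-free: one single segment
          subst ht
          simp only [List.append_nil] at hr
          subst hr
          -- from here the segment is the whole of c :: r (s was replaced by r)
          have hfree : ∀ d ∈ c :: r, d ≠ '/' := by
            intro d hd
            rcases List.mem_cons.mp hd with h | h
            · exact h ▸ hc
            · exact hs d h
          have hsp : sp (c :: r) = [c :: r] := sp_free _ hfree
          by_cases hm : multiB (c :: r) = true
          · have hm' : c = '*' ∨ (c :: r).take 3 = ['.', '.', '.'] := by
              simpa only [multiB, List.head?_cons, Option.some.injEq, decide_eq_true_eq] using hm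
            rw [cutRel_cons_pos _ _ _ ⟨rfl, hm'⟩, List.take_zero, hsp]
            rw [List.filter_cons_of_pos (by simp), List.takeWhile_cons_of_neg (by simp [hm])]
            simp [sp]
          · have hc0 : cutRel true (c :: r) = (c :: r).length := by
              rw [cutRel_cons_neg _ _ _ (by rintro ⟨-, h2⟩; exact hm (multiB_of r h2))]
              rw [show (c == '/') = false from by simp [hc]]
              have happ : r = r ++ ([] : List Char) := by simp
              rw [happ, cutRel_false_free r [] hs]
              simp only [cutRel, List.length_cons, List.length_append, List.length_nil]
              omega
            rw [hc0, List.take_length, hsp]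
            rw [List.filter_cons_of_pos (by simp)]
            rw [List.takeWhile_cons_of_pos (by simp [Bool.eq_false_iff.mpr hm])]
            simp [sp]
        · -- r = s ++ '/' :: rest
          subst ht
          subst hr
          have hfree : ∀ d ∈ c :: s, d ≠ '/' := by
            intro d hd
            rcases List.mem_cons.mp hd with h | h
            · exact h ▸ hc
            · exact hs d h
          have hassoc : c :: (s ++ '/' :: rest) = (c :: s) ++ '/' :: rest := by simp
          have hsp : sp (c :: (s ++ '/' :: rest)) = (c :: s) :: sp rest := by
            rw [hassoc]; exact sp_app _ _ hfree
          have hcond0 : (c = '*' ∨ (c :: (s ++ '/' :: rest)).take 3 = ['.', '.', '.']) ↔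
              (c = '*' ∨ (c :: s).take 3 = ['.', '.', '.']) := by
            refine or_congr Iff.rfl ?_
            have h3 := take3_app (c :: s) rest hfree
            rw [hassoc]
            exact h3
          by_cases hm : multiB (c :: s) = true
          · have hm' : c = '*' ∨ (c :: s).take 3 = ['.', '.', '.'] := by
              simpa only [multiB, List.head?_cons, Option.some.injEq, decide_eq_true_eq] using hm
            rw [cutRel_cons_pos _ _ _ ⟨rfl, hcond0.mpr hm'⟩, List.take_zero, hsp]
            rw [List.filter_cons_of_pos (by simp), List.takeWhile_cons_of_neg (by simp [hm])]
            simp [sp]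
          · have hrest : cutRel false ('/' :: rest) = 1 + cutRel true rest := by
              rw [cutRel_cons_neg _ _ _ (by rintro ⟨h1, -⟩; exact absurd h1 (by decide))]
              simp
            have hc0 : cutRel true (c :: (s ++ '/' :: rest)) =
                1 + (s.length + (1 + cutRel true rest)) := by
              rw [cutRel_cons_neg _ _ _ (by
                rintro ⟨-, h2⟩
                exact hm (multiB_of s (hcond0.mp h2)))]
              rw [show (c == '/') = false from by simp [hc],
                cutRel_false_free s ('/' :: rest) hs, hrest]
            rw [hc0]
            have htake : (c :: (s ++ '/' :: rest)).take (1 + (s.length + (1 + cutRel true rest)))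
                = (c :: s) ++ '/' :: rest.take (cutRel true rest) := by
              rw [Nat.add_comm 1 (s.length + (1 + cutRel true rest)), List.take_succ_cons]
              rw [List.take_append]
              rw [List.take_of_length_le (by omega), Nat.add_sub_cancel_left]
              rw [Nat.add_comm 1 (cutRel true rest)]
              simp [List.take_succ_cons]
            rw [htake, sp_app _ _ hfree, hsp]
            rw [List.filter_cons_of_pos (by simp), List.filter_cons_of_pos (by simp)]
            rw [List.takeWhile_cons_of_pos (by simp [Bool.eq_false_iff.mpr hm])]
            have hlen : rest.length ≤ n := by
              simp only [List.length_cons, List.length_append] at hcs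
              omega
            rw [ih rest hlen]

-- A's loop is takeWhile-after-filter over the segments (as Strings)
lemma wild_of_multi (s : String) (h : s.toList ≠ []) :
    (wild_of s).2.2 = (PySem.Str.startswith s "*" || PySem.Str.startswith s "...") := by
  obtain ⟨c, cs, hcs⟩ := List.exists_cons_of_ne_nil h
  simp only [wild_of, h, if_neg, PySem.Str.pyGet?_eq, PySem.Str.startswith_eq, hcs,
    PySem.Chars.startswith, PySem.Chars.pyGet?_eq_listPyGet?]
  simp [PySem.List.pyGet?, PySem.List.pyIdx?, List.isPrefixOf_iff_prefix]
  by_cases h1 : c = '*' <;> by_cases h2 : c = ':' <;> by_cases h3 : c = '.' <;>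
    simp_all [List.isPrefixOf] <;> (try split_ifs) <;> simp_all [List.isPrefixOf] <;>
    first
      | tauto
      | (rename_i hp
         exact Bool.eq_false_iff.mpr fun hh => hp (List.isPrefixOf_iff_prefix.mp hh))

lemma loop_eq (l : List String) (acc : List String) :
    split_pattern_loop acc l =
      acc ++ (l.filter (fun p => !(p.toList = []))).takeWhile
        (fun p => !(PySem.Str.startswith p "*" || PySem.Str.startswith p "...")) := by
  induction l generalizing acc with
  | nil => simp [split_pattern_loop]
  | cons part rest ih =>
    by_cases h : part.toList = []
    · have h' : part = "" := by simpa using h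
      simp [split_pattern_loop, h', ih]
    · have h' : ¬ part = "" := fun he => h (by simp [he])
      rw [split_pattern_loop, if_pos h, wild_of_multi part h,
        List.filter_cons_of_pos (by simpa using h),
        List.takeWhile_cons]
      by_cases hm : (PySem.Str.startswith part "*" || PySem.Str.startswith part "...") = true
      · rw [if_pos hm]
        have hp : (fun p => !(PySem.Str.startswith p "*" || PySem.Str.startswith p "...")) part = false := by
          simp only [hm, Bool.not_true]
        simp only [hp, Bool.false_eq_true, if_false, List.append_nil]
      · rw [if_neg hm, ih]
        have hp : (fun p => !(PySem.Str.startswith p "*" || PySem.Str.startswith p "...")) part = true := by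
          simp only [Bool.eq_false_iff.mpr hm, Bool.not_false]
        simp only [hp, if_true, List.append_assoc, List.cons_append, List.nil_append]

lemma star_prefix (x : List Char) : (['*'] <+: x) ↔ x.head? = some '*' := by
  cases x <;> simp [List.cons_prefix_iff]

lemma dots_prefix (x : List Char) : (['.', '.', '.'] <+: x) ↔ x.take 3 = ['.', '.', '.'] := by
  match x with
  | [] => simp
  | [a] => simp [List.cons_prefix_iff]
  | [a, b] => simp [List.cons_prefix_iff]
  | a :: b :: d :: tl => simp [List.cons_prefix_iff]

-- the String-level multi test is multiB of the char list
lemma startswith_multiB (p : String) :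
    (PySem.Str.startswith p "*" || PySem.Str.startswith p "...") = multiB p.toList := by
  rw [Bool.eq_iff_iff]
  simp only [Bool.or_eq_true, PySem.Str.startswith_eq, PySem.Chars.startswith_iff, multiB,
    decide_eq_true_eq]
  have h1 : ("*").toList = ['*'] := rfl
  have h2 : ("...").toList = ['.', '.', '.'] := rfl
  rw [h1, h2, star_prefix, dots_prefix]

-- ===== VERDICT (by name: the statement is the Claim_ definition above) =====
theorem split_pattern_spec : Claim_equal_split_pattern := by
  intro pattern _
  unfold Spec_split_pattern split_pattern split_pattern_alt
  rw [loop_eq, List.nil_append]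
  have hsegs : ∀ (q : String), (PySem.Str.split? q "/").getD []
      = (sp q.toList).map String.ofList := by
    intro q
    rw [PySem.Str.split?]
    simp [PySem.Chars.split?, splitOn_eq_sp, show ("/").toList = ['/'] from rfl]
  have hcut : split_pattern_cut pattern 0 = cutRel true pattern.toList := by
    rw [cut_eq pattern pattern.toList.length 0 (by omega) (by omega)]
    simp
  have hslice : (PySem.Str.slice pattern none (some ((split_pattern_cut pattern 0 : Nat) : Int))).toList
      = pattern.toList.take (split_pattern_cut pattern 0) := by
    rw [PySem.Str.toList_slice, PySem.Chars.slice_eq_listSlice,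
      PySem.List.slice_to _ (Int.natCast_nonneg _)]
    simp
  simp only [hsegs]
  rw [hslice, hcut]
  rw [List.filter_map, List.filter_map, List.takeWhile_map]
  have hpe : ((fun p => !(p.toList = [])) ∘ String.ofList) = (fun x : List Char => !(x = [])) := by
    funext x; simp
  have hpm : ((fun p => !(PySem.Str.startswith p "*" || PySem.Str.startswith p "...")) ∘ String.ofList)
      = (fun x : List Char => !(multiB x)) := by
    funext x
    simp only [Function.comp_apply, startswith_multiB]
    congr 1
    simp
  rw [hpe, hpm]
  rw [← main_lemma pattern.toList.length pattern.toList le_rfl]
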